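-- pv_equiv track=rewrite | github.com/pypi-data/pypi-code-143 | intersystems-iris/intersystems-iris-3.3.0b11.tar.gz/intersystems_iris/_IRIS.py | _remove_scientific_notation
-- ===== SOURCE A (Python) =====
-- def _remove_scientific_notation(value):
--     if value.startswith("-"):
--         negative_sign = "-"
--         value = value[1:]
--     else:
--         negative_sign = ""
--     if "E" in value:
--         number = value.split("E")[0]
--         exponent = int(value.split("E")[1])
--     else:
--         number = value
--         exponent = 0
--     if exponent>0:
--         if "." in number:
--             index = number.index(".")
--             if exponent - len(number) + index + 1 >0:
--                 number = number + "0" * (exponent - len(number) + index + 1)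
--             number = number[0:index] + number[index+1:index+exponent+1] + "." + number[index+exponent+1:]
--             if number.endswith("."):
--                 number = number[:-1]
--         else:
--             number = number + ("0" * exponent)
--     elif exponent<0:
--         exponent = abs(exponent)
--         if "." not in value:
--             number = number + "."
--         index = number.index(".")
--         if index < exponent:
--             number = ("0" * (exponent - index)) + number
--             index = exponent
--         number = number[0:index-exponent]+"."+number[index-exponent:index]+number[index+1:]
--     if "." in number:
--         while number.endswith("0"): number = number[:-1]
--         if number.endswith("."): number = number[:-1]
--     while number.startswith("0"):
--         number = number[1:]
--     if number == "" or number == ".":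
--         return "0"
--     return negative_sign + number
-- ===== SOURCE B (Python) =====
-- def _remove_scientific_notation(value):
--     neg = ""
--     if value.startswith("-"):
--         neg = "-"
--         value = value[1:]
--     mant, sep, rest = value.partition("E")
--     exponent = int(rest.partition("E")[0]) if sep else 0
--     intd, _, frac = mant.partition(".")
--     digits = intd + frac
--     point = len(intd) + exponent
--     if point < 0:
--         digits = "0" * (-point) + digits
--         point = 0
--     elif point > len(digits):
--         digits = digits + "0" * (point - len(digits))
--     int_part = digits[:point].lstrip("0")
--     frac_part = digits[point:].rstrip("0")
--     result = int_part + ("." + frac_part if frac_part else "")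
--     if not result:
--         return "0"
--     return neg + result
-- ===== Notes on version B (the rewrite author's own statement) =====
-- stated objective: simpler
-- what changed: Instead of A's branchy in-place string splicing around the dot (three exponent cases, each re-slicing the string and patching pad zeros in), B converts the mantissa once to a digit string plus a decimal-point position, shifts the position by the exponent, pads, and reassembles with two slices and two strips.
-- outside the precondition, e.g. on _remove_scientific_notation('1.2.30E4'): A returns '12.3', B returns '12.30'; on _remove_scientific_notation('1.2.3'): A returns '1.2.3', B returns '1.2.3'
import Mathlib
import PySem

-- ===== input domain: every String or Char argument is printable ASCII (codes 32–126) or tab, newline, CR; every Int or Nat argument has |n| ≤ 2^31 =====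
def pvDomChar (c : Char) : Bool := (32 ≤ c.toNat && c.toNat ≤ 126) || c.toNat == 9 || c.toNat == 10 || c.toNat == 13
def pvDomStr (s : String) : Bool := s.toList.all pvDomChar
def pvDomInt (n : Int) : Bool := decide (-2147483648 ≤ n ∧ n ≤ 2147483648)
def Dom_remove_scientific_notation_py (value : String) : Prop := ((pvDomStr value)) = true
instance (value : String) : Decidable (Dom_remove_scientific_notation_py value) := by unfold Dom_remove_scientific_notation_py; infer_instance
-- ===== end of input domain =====

-- B rewrites A by a positional decomposition: digits + decimal-point index, then take/drop — no splicing; objective: simpler.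

-- ===== PORT A =====

-- while number.endswith("0"): number = number[:-1]
def pvATrimZeros (n : List Char) : List Char :=
  if h : PySem.Chars.endswith n ['0'] then pvATrimZeros (PySem.List.slice n none (some (-1))) else n
termination_by n.length
decreasing_by
  rw [PySem.List.slice_to_neg_one]
  have hne : n ≠ [] := by
    intro hn; rw [hn] at h; simp [PySem.Chars.endswith_iff] at h
  have : 0 < n.length := List.length_pos_iff.mpr hne
  simp [List.length_dropLast]
  omega

-- while number.startswith("0"): number = number[1:]
def pvALstrip (n : List Char) : List Char :=
  if h : PySem.Chars.startswith n ['0'] then pvALstrip (PySem.List.slice n (some 1) none) else n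
termination_by n.length
decreasing_by
  rw [PySem.List.slice_from n (by norm_num : (0:Int) ≤ 1)]
  have hne : n ≠ [] := by
    intro hn; rw [hn] at h; simp [PySem.Chars.startswith_iff] at h
  simp
  exact List.length_pos_iff.mpr hne

-- the exponent-shifting block of A (v is the sign-stripped value, used by A's "." in value test)
def pvAExp (v number : List Char) (e : Int) : List Char :=
  if e > 0 then
    if PySem.Chars.isIn ['.'] number then
      let index := PySem.Chars.find number ['.']      -- number.index("."): present by the guard
      let number := if e - number.length + index + 1 > 0
        then number ++ List.replicate (e - (number.length : Int) + index + 1).toNat '0'  -- "0" * k, k > 0 here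
        else number
      let number := PySem.List.slice number (some 0) (some index)
        ++ PySem.List.slice number (some (index + 1)) (some (index + e + 1))
        ++ ['.'] ++ PySem.List.slice number (some (index + e + 1)) none
      if PySem.Chars.endswith number ['.'] then PySem.List.slice number none (some (-1)) else number
    else number ++ List.replicate e.toNat '0'
  else if e < 0 then
    let e := |e|
    let number := if ¬ PySem.Chars.isIn ['.'] v then number ++ ['.'] else number
    let index := PySem.Chars.find number ['.']
    let r := if index < e then (List.replicate (e - index).toNat '0' ++ number, e) else (number, index)
    PySem.List.slice r.1 (some 0) (some (r.2 - e)) ++ ['.']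
      ++ PySem.List.slice r.1 (some (r.2 - e)) (some r.2)
      ++ PySem.List.slice r.1 (some (r.2 + 1)) none
  else number

-- the final stripping block of A
def pvAFinish (neg number : List Char) : List Char :=
  let number := if PySem.Chars.isIn ['.'] number then
      let number := pvATrimZeros number
      if PySem.Chars.endswith number ['.'] then PySem.List.slice number none (some (-1)) else number
    else number
  let number := pvALstrip number
  if number = [] ∨ number = ['.'] then ['0'] else neg ++ number

def pvACore (value : List Char) : List Char :=
  let p := if PySem.Chars.startswith value ['-']
           then (['-'], PySem.List.slice value (some 1) none)
           else (([] : List Char), value)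
  let q : List Char × Int :=
    if PySem.Chars.isIn ['E'] p.2 then
      (PySem.List.pyGetD (PySem.Chars.splitOn p.2 ['E']) 0 [],
       (PySem.Int.ofChars? (PySem.List.pyGetD (PySem.Chars.splitOn p.2 ['E']) 1 [])).getD 0)
    else (p.2, 0)
  pvAFinish p.1 (pvAExp p.2 q.1 q.2)

def remove_scientific_notation_py (value : String) : String :=
  String.ofList (pvACore value.toList)

-- ===== PORT B =====

-- s.partition(c) for a one-character separator: (head, found, tail); exact for len(sep) == 1
def pvBPartition (s : List Char) (c : Char) : List Char × Bool × List Char :=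
  (s.takeWhile (· ≠ c), !(s.dropWhile (· ≠ c)).isEmpty, (s.dropWhile (· ≠ c)).tail)

def pvBCore (value : List Char) : List Char :=
  let p := if PySem.Chars.startswith value ['-']
           then (['-'], PySem.List.slice value (some 1) none)
           else (([] : List Char), value)
  let neg := p.1
  let m := pvBPartition p.2 'E'
  let e : Int := if m.2.1 then (PySem.Int.ofChars? (pvBPartition m.2.2 'E').1).getD 0 else 0
  let d := pvBPartition m.1 '.'
  let digits := d.1 ++ d.2.2
  let point : Int := (d.1.length : Int) + e
  let r := if point < 0 then (List.replicate (-point).toNat '0' ++ digits, (0 : Int))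
           else if point > digits.length then (digits ++ List.replicate (point - digits.length).toNat '0', point)
           else (digits, point)
  let int_part := (PySem.List.slice r.1 none (some r.2)).dropWhile (· == '0')          -- .lstrip("0"): exact
  let frac_part := ((PySem.List.slice r.1 (some r.2) none).reverse.dropWhile (· == '0')).reverse  -- .rstrip("0"): exact
  let result := int_part ++ (if frac_part ≠ [] then '.' :: frac_part else [])
  if result = [] then ['0'] else neg ++ result

def remove_scientific_notation_py_alt (value : String) : String :=
  String.ofList (pvBCore value.toList)

-- ===== PRECONDITION & SPEC =====
-- Pre_ excludes (a) inputs on which A raises a ValueError: an exponent part that int cannot parse, or a negative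
-- exponent with a dotless mantissa while a dot occurs later in the string (A then searches the mantissa for a dot);
-- and (b) malformed mantissas containing more than one dot, on which A's digit reshuffle around the first dot is accidental.
def Pre_remove_scientific_notation_py (value : String) : Prop :=
  let v := if PySem.Chars.startswith value.toList ['-'] then value.toList.tail else value.toList
  let m := v.takeWhile (· ≠ 'E')
  let estr := ((v.dropWhile (· ≠ 'E')).tail).takeWhile (· ≠ 'E')
  m.count '.' ≤ 1 ∧
  ('E' ∈ v → (PySem.Int.ofChars? estr).isSome ∧
    ((PySem.Int.ofChars? estr).getD 0 < 0 → '.' ∉ m → '.' ∉ v))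
instance (value : String) : Decidable (Pre_remove_scientific_notation_py value) := by
  unfold Pre_remove_scientific_notation_py; infer_instance

def pvWitness_remove_scientific_notation_py : String := "1.5E2"

def Spec_remove_scientific_notation_py (value : String) (out : String) : Prop := out = remove_scientific_notation_py_alt value
instance (value : String) (out : String) : Decidable (Spec_remove_scientific_notation_py value out) := by unfold Spec_remove_scientific_notation_py; infer_instance

-- ===== CLAIM (what is proved, stated in full; the proofs are below) =====
def Claim_equal_remove_scientific_notation_py : Prop := ∀ (value : String), Dom_remove_scientific_notation_py value → Pre_remove_scientific_notation_py value → Spec_remove_scientific_notation_py value (remove_scientific_notation_py value)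

-- singleton suffix/prefix/infix characterizations
theorem pv_singleton_suffix (l : List Char) (c : Char) : [c] <:+ l ↔ l.getLast? = some c := by
  constructor
  · rintro ⟨t, rfl⟩; simp
  · intro h
    cases hl : l.getLast? with
    | none => simp [hl] at h
    | some x =>
      rw [hl] at h; cases h
      rcases List.eq_nil_or_concat l with rfl | ⟨t, a, rfl⟩
      · simp at hl
      · simp at hl; subst hl; exact ⟨t, by simp⟩

theorem pv_singleton_prefix (l : List Char) (c : Char) : [c] <+: l ↔ l.head? = some c := by
  constructor
  · rintro ⟨t, rfl⟩; simp
  · intro h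
    cases l with
    | nil => simp at h
    | cons a t => simp at h; subst h; exact ⟨t, rfl⟩

theorem pv_isIn_singleton (l : List Char) (c : Char) : PySem.Chars.isIn [c] l = true ↔ c ∈ l := by
  rw [PySem.Chars.isIn_iff_infix]
  constructor
  · rintro ⟨s, t, rfl⟩; simp
  · intro h
    rcases List.append_of_mem h with ⟨s, t, rfl⟩
    exact ⟨s, t, by simp⟩

theorem pv_endswith_singleton (l : List Char) (c : Char) :
    PySem.Chars.endswith l [c] = true ↔ l.getLast? = some c := by
  rw [PySem.Chars.endswith_iff, pv_singleton_suffix]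

-- pvATrimZeros is rstrip("0")
theorem pv_trim_eq (l : List Char) : pvATrimZeros l = (l.reverse.dropWhile (· == '0')).reverse := by
  induction l using pvATrimZeros.induct with
  | case1 n h ih =>
    rw [pvATrimZeros, dif_pos h, ih, PySem.List.slice_to_neg_one]
    rw [pv_endswith_singleton] at h
    rcases List.eq_nil_or_concat n with rfl | ⟨t, a, rfl⟩
    · simp at h
    · simp at h; subst h; simp
  | case2 n h =>
    rw [pvATrimZeros, dif_neg h]
    rw [pv_endswith_singleton] at h
    cases hn : n.reverse with
    | nil => simp_all
    | cons a t =>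
      have : n.getLast? = some a := by
        rw [List.getLast?_eq_head?_reverse, hn]; rfl
      have ha : ¬ (a == '0') = true := by
        simp; rintro rfl; exact h this
      rw [List.dropWhile_cons, if_neg ha, ← hn, List.reverse_reverse]

-- pvALstrip is lstrip("0")
theorem pv_lstrip_eq (l : List Char) : pvALstrip l = l.dropWhile (· == '0') := by
  induction l using pvALstrip.induct with
  | case1 n h ih =>
    rw [pvALstrip, dif_pos h, ih, PySem.List.slice_from n (by norm_num : (0:Int) ≤ 1)]
    rw [PySem.Chars.startswith_iff, pv_singleton_prefix] at h
    cases n with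
    | nil => simp at h
    | cons a t => simp at h; subst h; simp
  | case2 n h =>
    rw [pvALstrip, dif_neg h]
    rw [PySem.Chars.startswith_iff, pv_singleton_prefix] at h
    cases n with
    | nil => rfl
    | cons a t =>
      have ha : ¬ (a == '0') = true := by simp; rintro rfl; simp at h
      rw [List.dropWhile_cons, if_neg ha]

-- find of the first '.' in I ++ '.' :: F
theorem pv_find_dot (I F : List Char) (hI : '.' ∉ I) :
    PySem.Chars.find (I ++ '.' :: F) ['.'] = (I.length : Int) := by
  set l := I ++ '.' :: F with hl
  have hinf : ['.'] <:+: l := ⟨I, F, by simp [hl]⟩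
  have hnn : 0 ≤ PySem.Chars.find l ['.'] := (PySem.Chars.find_nonneg_iff _ _).mpr hinf
  obtain ⟨h1, h2⟩ := PySem.Chars.find_spec hnn
  set n := (PySem.Chars.find l ['.']).toNat with hn
  have hne : n = I.length := by
    rcases Nat.lt_trichotomy n I.length with hlt | heq | hgt
    · exfalso
      rw [pv_singleton_prefix, List.head?_drop] at h1
      have : l[n]? = I[n]? := by
        rw [hl]; exact (List.getElem?_append_left hlt)
      rw [this] at h1
      exact hI (List.mem_of_getElem? (by rw [h1]))
    · exact heq
    · exfalso
      refine h2 I.length hgt ?_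
      rw [pv_singleton_prefix, List.head?_drop, hl, List.getElem?_append_right (le_refl _)]
      simp
  have : PySem.Chars.find l ['.'] = (n : Int) := by omega
  rw [this, hne]
theorem pv_go_zero (c : Char) (l cur acc) : PySem.Chars.splitOn.go [c] 0 l cur acc = ((cur.reverse ++ l) :: acc).reverse := by
  rw [PySem.Chars.splitOn.go]
theorem pv_go_nil (c : Char) (fuel cur acc) : PySem.Chars.splitOn.go [c] (fuel+1) [] cur acc = (cur.reverse :: acc).reverse := by
  rw [PySem.Chars.splitOn.go]
  omega
theorem pv_go_ne (c a : Char) (fuel l cur acc) (h : a ≠ c) :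
    PySem.Chars.splitOn.go [c] (fuel+1) (a::l) cur acc = PySem.Chars.splitOn.go [c] fuel l (a::cur) acc := by
  rw [PySem.Chars.splitOn.go]
  have : ([c].isPrefixOf (a::l)) = false := by
    simp [List.isPrefixOf]; exact fun hh => absurd hh.symm h
  simp [this]
theorem pv_go_eq (c : Char) (fuel l cur acc) :
    PySem.Chars.splitOn.go [c] (fuel+1) (c::l) cur acc = PySem.Chars.splitOn.go [c] fuel l [] (cur.reverse :: acc) := by
  rw [PySem.Chars.splitOn.go]
  simp [List.isPrefixOf]

-- accumulator comes out in front
theorem pv_go_acc (c : Char) : ∀ (fuel : Nat) (l cur : List Char) (acc : List (List Char)),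
    PySem.Chars.splitOn.go [c] fuel l cur acc = acc.reverse ++ PySem.Chars.splitOn.go [c] fuel l cur [] := by
  intro fuel
  induction fuel with
  | zero => intro l cur acc; rw [pv_go_zero, pv_go_zero]; simp
  | succ n ih =>
    intro l cur acc
    cases l with
    | nil => rw [pv_go_nil, pv_go_nil]; simp
    | cons a t =>
      by_cases h : a = c
      · subst h
        rw [pv_go_eq, pv_go_eq, ih, ih t [] [cur.reverse]]
        simp
      · rw [pv_go_ne c a n t cur acc h, pv_go_ne c a n t cur [] h, ih]

theorem pv_go_no_sep (c : Char) : ∀ (l : List Char), c ∉ l → ∀ (fuel : Nat) (cur : List Char) (acc : List (List Char)), l.length < fuel →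
    PySem.Chars.splitOn.go [c] fuel l cur acc = acc.reverse ++ [cur.reverse ++ l] := by
  intro l
  induction l with
  | nil => intro _ fuel cur acc hf
           cases fuel with
           | zero => omega
           | succ n => rw [pv_go_nil]; simp
  | cons a t ih =>
    intro hmem fuel cur acc hf
    cases fuel with
    | zero => omega
    | succ n =>
      have ha : a ≠ c := fun h => hmem (h ▸ List.mem_cons_self)
      rw [pv_go_ne c a n t cur _ ha, ih (fun h => hmem (List.mem_cons_of_mem _ h)) n _ _ (by simpa using hf)]
      simp

theorem pv_go_sep (c : Char) : ∀ (m : List Char), c ∉ m → ∀ (r : List Char) (fuel : Nat) (cur : List Char) (acc : List (List Char)), m.length < fuel →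
    PySem.Chars.splitOn.go [c] fuel (m ++ c :: r) cur acc
      = PySem.Chars.splitOn.go [c] (fuel - m.length - 1) r [] ((cur.reverse ++ m) :: acc) := by
  intro m
  induction m with
  | nil => intro _ r fuel cur acc hf
           cases fuel with
           | zero => omega
           | succ n => rw [List.nil_append, pv_go_eq]; simp
  | cons a t ih =>
    intro hmem r fuel cur acc hf
    cases fuel with
    | zero => omega
    | succ n =>
      have ha : a ≠ c := fun h => hmem (h ▸ List.mem_cons_self)
      rw [List.cons_append, pv_go_ne c a n _ cur _ ha,
          ih (fun h => hmem (List.mem_cons_of_mem _ h)) r n _ _ (by simpa using hf)]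
      simp

theorem pv_dropWhile_ne_cons (c : Char) (v : List Char) (h : c ∈ v) :
    v.dropWhile (· ≠ c) = c :: (v.dropWhile (· ≠ c)).tail := by
  have hne : v.dropWhile (· ≠ c) ≠ [] := by
    rw [Ne, List.dropWhile_eq_nil_iff]
    intro hall
    have := hall c h
    simp at this
  have hh := List.head_dropWhile_not (fun x => (x ≠ c : Bool)) hne
  cases hdw : v.dropWhile (· ≠ c) with
  | nil => exact absurd hdw hne
  | cons a t =>
    have : a = c := by
      simp only [hdw] at hh
      simpa using hh
    subst this
    rfl

theorem pv_split_decomp (c : Char) (v : List Char) (h : c ∈ v) :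
    v = v.takeWhile (· ≠ c) ++ c :: (v.dropWhile (· ≠ c)).tail := by
  conv_lhs => rw [← List.takeWhile_append_dropWhile (p := (· ≠ c)) (l := v)]
  rw [← pv_dropWhile_ne_cons c v h]

theorem pv_not_mem_takeWhile_ne (c : Char) (v : List Char) : c ∉ v.takeWhile (· ≠ c) := by
  intro hmem
  have := List.takeWhile_subset (p := (· ≠ c)) (l := v)
  have h2 := List.mem_takeWhile_imp hmem
  simp at h2

theorem pv_splitOn_parts (c : Char) (v : List Char) (h : c ∈ v) :
    ∃ rest, PySem.Chars.splitOn v [c]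
      = (v.takeWhile (· ≠ c)) :: (((v.dropWhile (· ≠ c)).tail).takeWhile (· ≠ c)) :: rest := by
  set m := v.takeWhile (· ≠ c) with hm
  set r := (v.dropWhile (· ≠ c)).tail with hr
  have hv : v = m ++ c :: r := pv_split_decomp c v h
  have hcm : c ∉ m := pv_not_mem_takeWhile_ne c v
  have hlen : v.length = m.length + 1 + r.length := by rw [hv]; simp; omega
  have e1 : PySem.Chars.splitOn v [c]
      = PySem.Chars.splitOn.go [c] ((m.length + 1 + r.length) + 1) (m ++ c :: r) [] [] := by
    rw [PySem.Chars.splitOn, ← hv, ← hlen]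
  rw [e1, pv_go_sep c m hcm r _ [] [] (by omega)]
  have hf : m.length + 1 + r.length + 1 - m.length - 1 = r.length + 1 := by omega
  rw [hf, pv_go_acc]
  simp only [List.reverse_nil, List.nil_append, List.reverse_cons, List.reverse_singleton]
  by_cases hc2 : c ∈ r
  · set m2 := r.takeWhile (· ≠ c) with hm2
    set r2 := (r.dropWhile (· ≠ c)).tail with hr2
    have hrv : r = m2 ++ c :: r2 := pv_split_decomp c r hc2
    have hcm2 : c ∉ m2 := pv_not_mem_takeWhile_ne c r
    have hlen2 : r.length = m2.length + 1 + r2.length := by rw [hrv]; simp; omega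
    rw [hrv, pv_go_sep c m2 hcm2 r2 _ [] [] (by simp), pv_go_acc]
    exact ⟨PySem.Chars.splitOn.go [c] (m2.length + (r2.length + 1) + 1 - m2.length - 1) r2 [] [], by simp⟩
  · rw [pv_go_no_sep c r hc2 (r.length + 1) [] [] (by omega)]
    have : r.takeWhile (· ≠ c) = r := by
      rw [List.takeWhile_eq_self_iff]
      intro x hx
      simp
      rintro rfl; exact hc2 hx
    rw [this]
    exact ⟨[], by simp⟩

theorem pv_mem_dropWhile {l : List Char} {p : Char → Bool} {x : Char} (h : x ∈ l.dropWhile p) : x ∈ l :=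
  (List.dropWhile_sublist (p := p) (l := l)).mem h

-- the final pipeline of A agrees with B's assemble-from-parts, given the split A produced
theorem pv_fin (neg pre post : List Char) (dflag : Bool)
    (hpre : '.' ∉ pre) (hpost : '.' ∉ post) (hd : dflag = false → post = []) :
    pvAFinish neg (pre ++ if dflag then '.' :: post else []) =
      (if pre.dropWhile (· == '0') ++ (if ((post.reverse.dropWhile (· == '0')).reverse : List Char) ≠ [] then '.' :: (post.reverse.dropWhile (· == '0')).reverse else []) = [] then ['0']
       else neg ++ (pre.dropWhile (· == '0') ++ (if ((post.reverse.dropWhile (· == '0')).reverse : List Char) ≠ [] then '.' :: (post.reverse.dropWhile (· == '0')).reverse else []))) := by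
  set ip := pre.dropWhile (· == '0') with hip
  have hipdot : '.' ∉ ip := fun hm => hpre (pv_mem_dropWhile hm)
  have hip_ne : ip ≠ ['.'] := by
    intro hh; exact hipdot (by rw [hh]; exact List.mem_cons_self)
  cases dflag with
  | false =>
    have hpost0 : post = [] := hd rfl
    subst hpost0
    simp only [Bool.false_eq_true, if_false, List.append_nil]
    simp only [List.reverse_nil, List.dropWhile_nil, ne_eq, not_true_eq_false, if_false,
      List.append_nil, if_neg]
    rw [pvAFinish]
    have hno : ¬ (PySem.Chars.isIn ['.'] pre = true) := fun h => hpre ((pv_isIn_singleton _ _).mp h)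
    simp only [hno, if_neg, if_false, Bool.false_eq_true]
    rw [pv_lstrip_eq, ← hip]
    by_cases h0 : ip = []
    · simp [h0]
    · rw [if_neg (by simp [h0, hip_ne]), if_neg h0]
  | true =>
    rw [if_pos rfl]
    rw [pvAFinish]
    have hyes : PySem.Chars.isIn ['.'] (pre ++ '.' :: post) = true :=
      (pv_isIn_singleton _ _).mpr (by simp)
    simp only [hyes, if_pos, if_true]
    
    rw [pv_trim_eq]
    have hrev : (pre ++ '.' :: post).reverse = post.reverse ++ '.' :: pre.reverse := by simp
    rw [hrev, List.dropWhile_append]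
    set E := post.reverse.dropWhile (· == '0') with hE
    set fp := E.reverse with hfp
    have hfp_mem : ∀ x ∈ fp, x ∈ post := by
      intro x hx
      rw [hfp, List.mem_reverse] at hx
      have := pv_mem_dropWhile hx
      rwa [List.mem_reverse] at this
    by_cases hEe : E = []
    · simp only [hEe, List.isEmpty_nil, if_true, List.reverse_nil]
      have : ('.' :: pre.reverse).dropWhile (· == '0') = '.' :: pre.reverse := by
        rw [List.dropWhile_cons, if_neg (by simp)]
      rw [this]
      have : ('.' :: pre.reverse).reverse = pre ++ ['.'] := by simp
      rw [this]
      have hend : PySem.Chars.endswith (pre ++ ['.']) ['.'] = true := by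
        rw [pv_endswith_singleton]; simp
      simp only [hend, if_pos, if_true]
      rw [PySem.List.slice_to_neg_one, List.dropLast_concat]
      rw [pv_lstrip_eq, ← hip]
      have hfpe : fp = [] := by simp [hfp, hEe]
      simp only [hfpe, ne_eq, not_true_eq_false, if_false, List.append_nil]
      by_cases h0 : ip = []
      · simp [h0]
      · rw [if_neg (by simp [h0, hip_ne]), if_neg h0]
  -- E ≠ []
    · have hEne : (E.isEmpty) = false := by simpa [List.isEmpty_iff] using hEe
      simp only [hEne, if_neg, Bool.false_eq_true, if_false]
      have : (E ++ '.' :: pre.reverse).reverse = pre ++ '.' :: fp := by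
        simp [hfp]
      rw [this]
      have hfpne : fp ≠ [] := by simpa [hfp] using hEe
      have hend : ¬ (PySem.Chars.endswith (pre ++ '.' :: fp) ['.'] = true) := by
        rw [pv_endswith_singleton]
        intro hh
        have h1 : (pre ++ '.' :: fp).getLast? = fp.getLast? := by
          rcases List.exists_cons_of_ne_nil hfpne with ⟨a, t, hat⟩
          rw [List.getLast?_append, hat]
          simp [List.getLast?_cons]
        rw [h1] at hh
        have : '.' ∈ fp := by
          have := List.getLast?_eq_some_iff.mp hh
          rcases this with ⟨t, ht⟩
          rw [ht]; simp
        exact hpost ((hfp_mem _ this))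
      rw [if_neg hend]
      rw [pv_lstrip_eq]
      rw [List.dropWhile_append]
      have hdz : ('.' :: fp).dropWhile (· == '0') = '.' :: fp := by
        rw [List.dropWhile_cons, if_neg (by simp)]
      have hres : (if (pre.dropWhile (· == '0')).isEmpty = true then ('.' :: fp).dropWhile (· == '0')
          else pre.dropWhile (· == '0') ++ '.' :: fp) = ip ++ '.' :: fp := by
        by_cases h0 : ip = []
        · rw [if_pos (by simp [← hip, h0]), hdz, h0]; rfl
        · rw [if_neg (by simp [← hip, h0])]
      have hne2 : ¬ (ip ++ '.' :: fp = [] ∨ ip ++ '.' :: fp = ['.']) := by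
        rintro (h1 | h2)
        · simp at h1
        · have hlen1 : ip.length + (fp.length + 1) = 1 := by
            have := congrArg List.length h2
            simpa using this
          have : fp.length = 0 := by omega
          exact hfpne (List.length_eq_zero_iff.mp this)
      rw [hres, if_neg hne2]
      simp only [ne_eq, hfpne, not_false_eq_true, if_true]
      rw [if_neg (by simp)]

theorem pv_take_IF (I : List Char) (c : Char) (R : List Char) :
    (I ++ c :: R).take I.length = I := by
  simpa using List.take_left (l₁ := I) (l₂ := c :: R)

theorem pv_drop_IF (I : List Char) (c : Char) (R : List Char) :
    (I ++ c :: R).drop (I.length + 1) = R := by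
  have : I ++ c :: R = (I ++ [c]) ++ R := by simp
  rw [this]
  have hl : (I ++ [c]).length = I.length + 1 := by simp
  rw [← hl, List.drop_left]

theorem pv_exp_pos (v I F : List Char) (e : Int) (hI : '.' ∉ I) (hF : '.' ∉ F) (he : 0 < e) :
    pvAExp v (I ++ '.' :: F) e =
      (I ++ (F ++ List.replicate (e.toNat - F.length) '0').take e.toNat)
        ++ (if ((F ++ List.replicate (e.toNat - F.length) '0').drop e.toNat : List Char) ≠ []
            then '.' :: (F ++ List.replicate (e.toNat - F.length) '0').drop e.toNat else []) := by
  set K := e.toNat with hK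
  have heK : e = (K : Int) := by omega
  set F' := F ++ List.replicate (K - F.length) '0' with hF'
  have hFdot' : '.' ∉ F' := by
    rw [hF']
    intro hm
    rcases List.mem_append.mp hm with h | h
    · exact hF h
    · simp at h
  simp only [pvAExp]
  rw [if_pos (show e > 0 from he)]
  rw [if_pos ((pv_isIn_singleton _ _).mpr (by simp))]
  rw [pv_find_dot I F hI]
  have hlen : ((I ++ '.' :: F).length : Int) = (I.length : Int) + 1 + F.length := by
    simp only [List.length_append, List.length_cons]; push_cast; ring
  -- the padded number is I ++ '.' :: F'
  have hpad :
      (if e - (I ++ '.' :: F).length + (I.length : Int) + 1 > 0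
        then (I ++ '.' :: F) ++ List.replicate ((e - ((I ++ '.' :: F).length : Int) + (I.length : Int) + 1).toNat) '0'
        else (I ++ '.' :: F)) = I ++ '.' :: F' := by
    by_cases hc : e - ((I ++ '.' :: F).length : Int) + (I.length : Int) + 1 > 0
    · rw [if_pos hc]
      have h1 : (e - ((I ++ '.' :: F).length : Int) + (I.length : Int) + 1).toNat = K - F.length := by
        rw [hlen] at hc ⊢; omega
      rw [h1, hF']
      simp
    · rw [if_neg hc]
      have h1 : K - F.length = 0 := by rw [hlen] at hc; omega
      rw [hF', h1]
      simp
  rw [hpad]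
  have hlen' : (I ++ '.' :: F').length = I.length + 1 + F'.length := by simp; omega
  -- the three slices
  have hs1 : PySem.List.slice (I ++ '.' :: F') (some 0) (some (I.length : Int)) = I := by
    rw [show (0 : Int) = ((0 : Nat) : Int) by norm_num, PySem.List.slice_natCast]
    simp [pv_take_IF]
  have hs2 : PySem.List.slice (I ++ '.' :: F') (some ((I.length : Int) + 1)) (some ((I.length : Int) + e + 1)) = F'.take K := by
    rw [heK, show ((I.length : Int) + 1) = (((I.length + 1 : Nat)) : Int) by push_cast; ring,
        show ((I.length : Int) + (K : Int) + 1) = (((I.length + 1 + K : Nat)) : Int) by push_cast; ring,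
        PySem.List.slice_natCast]
    rw [show I.length + 1 + K - (I.length + 1) = K by omega, pv_drop_IF]
  have hs3 : PySem.List.slice (I ++ '.' :: F') (some ((I.length : Int) + e + 1)) none = F'.drop K := by
    rw [heK, show ((I.length : Int) + (K : Int) + 1) = (((I.length + 1 + K : Nat)) : Int) by push_cast; ring]
    rw [PySem.List.slice_from _ (by positivity)]
    rw [Int.toNat_natCast]
    rw [show I.length + 1 + K = (I.length + 1) + K by omega, ← List.drop_drop, pv_drop_IF]
  rw [hs1, hs2, hs3]
  set D := F'.drop K with hD
  have hDdot : '.' ∉ D := fun hm => hFdot' (List.drop_subset _ _ hm)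
  by_cases hdrop : D = []
  · have hend : PySem.Chars.endswith (I ++ F'.take K ++ ['.'] ++ D) ['.'] = true := by
      rw [pv_endswith_singleton, hdrop]
      simp
    rw [if_pos hend, PySem.List.slice_to_neg_one, hdrop]
    simp
  · have hend : ¬ (PySem.Chars.endswith (I ++ F'.take K ++ ['.'] ++ D) ['.'] = true) := by
      rw [pv_endswith_singleton]
      intro hh
      have h1 : (I ++ F'.take K ++ ['.'] ++ D).getLast? = D.getLast? := by
        rw [List.getLast?_append]
        rcases List.exists_cons_of_ne_nil hdrop with ⟨a, t, hat⟩
        simp [hat, List.getLast?_cons]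
      rw [h1] at hh
      rcases List.getLast?_eq_some_iff.mp hh with ⟨t, ht⟩
      exact hDdot (by rw [ht]; simp)
    rw [if_neg hend, if_pos hdrop]
    simp

theorem pv_exp_zero (v num : List Char) : pvAExp v num 0 = num := by
  simp only [pvAExp]
  rw [if_neg (by omega), if_neg (by omega)]

theorem pv_exp_neg (v num I F : List Char) (e : Int) (hI : '.' ∉ I) (hF : '.' ∉ F) (he : e < 0)
    (h : (if ¬ PySem.Chars.isIn ['.'] v = true then num ++ ['.'] else num) = I ++ '.' :: F) :
    pvAExp v num e =
      (List.replicate (e.natAbs - I.length) '0' ++ I).take ((List.replicate (e.natAbs - I.length) '0' ++ I).length - e.natAbs)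
        ++ '.' :: ((List.replicate (e.natAbs - I.length) '0' ++ I).drop ((List.replicate (e.natAbs - I.length) '0' ++ I).length - e.natAbs) ++ F) := by
  set K := e.natAbs with hK
  set I' := List.replicate (K - I.length) '0' ++ I with hI'
  have hKpos : 0 < K := by omega
  have habs : |e| = (K : Int) := by rw [Int.abs_eq_natAbs]
  simp only [pvAExp]
  rw [if_neg (by omega), if_pos he, habs, h, pv_find_dot I F hI]
  have hsplit : (if ((I.length : Int)) < (K : Int) then
        (List.replicate (((K : Int) - (I.length : Int)).toNat) '0' ++ (I ++ '.' :: F), (K : Int))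
      else (I ++ '.' :: F, ((I.length : Int)))) = (I' ++ '.' :: F, ((I'.length : Int))) := by
    by_cases hc : I.length < K
    · rw [if_pos (by exact_mod_cast hc)]
      have h1 : (((K : Int) - (I.length : Int)).toNat) = K - I.length := by omega
      have h2 : I'.length = K := by rw [hI']; simp; omega
      rw [h1, h2, hI']
      simp
    · rw [if_neg (by omega)]
      have h1 : K - I.length = 0 := by omega
      have h2 : I' = I := by rw [hI', h1]; simp
      rw [h2]
  rw [hsplit]
  have hKle : K ≤ I'.length := by rw [hI']; simp; omega
  -- the three slices
  have ha : ((I'.length : Int)) - (K : Int) = ((I'.length - K : Nat) : Int) := by omega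
  have hs1 : PySem.List.slice (I' ++ '.' :: F) (some 0) (some ((I'.length : Int) - (K : Int))) = I'.take (I'.length - K) := by
    rw [ha, show (0 : Int) = ((0 : Nat) : Int) by norm_num, PySem.List.slice_natCast]
    simp only [Nat.sub_zero, List.drop_zero]
    exact List.take_append_of_le_length (by omega)
  have hs2 : PySem.List.slice (I' ++ '.' :: F) (some ((I'.length : Int) - (K : Int))) (some ((I'.length : Int))) = I'.drop (I'.length - K) := by
    rw [ha, PySem.List.slice_natCast]
    rw [List.drop_append_of_le_length (by omega)]
    rw [List.take_append_of_le_length (by simp)]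
    rw [List.take_of_length_le (by simp)]
  have hs3 : PySem.List.slice (I' ++ '.' :: F) (some ((I'.length : Int) + 1)) none = F := by
    rw [show ((I'.length : Int) + 1) = (((I'.length + 1 : Nat)) : Int) by push_cast; ring]
    rw [PySem.List.slice_from _ (by positivity), Int.toNat_natCast]
    exact pv_drop_IF I' '.' F
  rw [hs1, hs2, hs3]
  simp

def pvAsm (neg pre post : List Char) : List Char :=
  if pre.dropWhile (· == '0') ++ (if ((post.reverse.dropWhile (· == '0')).reverse : List Char) ≠ [] then '.' :: (post.reverse.dropWhile (· == '0')).reverse else []) = [] then ['0']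
  else neg ++ (pre.dropWhile (· == '0') ++ (if ((post.reverse.dropWhile (· == '0')).reverse : List Char) ≠ [] then '.' :: (post.reverse.dropWhile (· == '0')).reverse else []))

theorem pv_fin' (neg pre post : List Char) (dflag : Bool)
    (hpre : '.' ∉ pre) (hpost : '.' ∉ post) (hd : dflag = false → post = []) :
    pvAFinish neg (pre ++ if dflag then '.' :: post else []) = pvAsm neg pre post := by
  unfold pvAsm
  exact pv_fin neg pre post dflag hpre hpost hd

def pvBTail (neg I F : List Char) (e : Int) : List Char :=
  let digits := I ++ F
  let point : Int := (I.length : Int) + e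
  let r := if point < 0 then (List.replicate (-point).toNat '0' ++ digits, (0 : Int))
           else if point > digits.length then (digits ++ List.replicate (point - digits.length).toNat '0', point)
           else (digits, point)
  let int_part := (PySem.List.slice r.1 none (some r.2)).dropWhile (· == '0')
  let frac_part := ((PySem.List.slice r.1 (some r.2) none).reverse.dropWhile (· == '0')).reverse
  let result := int_part ++ (if frac_part ≠ [] then '.' :: frac_part else [])
  if result = [] then ['0'] else neg ++ result

theorem pv_bt_eq (neg I F : List Char) (e : Int) (digits' : List Char) (point' : Nat)
    (hr : (if ((I.length : Int) + e) < 0 then (List.replicate (-((I.length : Int) + e)).toNat '0' ++ (I ++ F), (0 : Int))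
           else if ((I.length : Int) + e) > (((I ++ F).length : Nat) : Int) then ((I ++ F) ++ List.replicate (((I.length : Int) + e) - (((I ++ F).length : Nat) : Int)).toNat '0', ((I.length : Int) + e))
           else ((I ++ F), ((I.length : Int) + e)))
        = (digits', ((point' : Nat) : Int))) :
    pvBTail neg I F e = pvAsm neg (digits'.take point') (digits'.drop point') := by
  simp only [pvBTail]
  rw [hr]
  have h1 : PySem.List.slice digits' none (some ((point' : Nat) : Int)) = digits'.take point' := by
    rw [PySem.List.slice_to _ (by positivity), Int.toNat_natCast]
  have h2 : PySem.List.slice digits' (some ((point' : Nat) : Int)) none = digits'.drop point' := by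
    rw [PySem.List.slice_from _ (by positivity), Int.toNat_natCast]
  rw [h1, h2, pvAsm]

theorem pv_both (neg v : List Char) (I F : List Char) (hasDot : Bool) (e : Int)
    (hI : '.' ∉ I) (hF : '.' ∉ F) (hnd : hasDot = false → F = [])
    (hv : e < 0 → (PySem.Chars.isIn ['.'] v = true ↔ hasDot = true)) :
    pvAFinish neg (pvAExp v (I ++ if hasDot then '.' :: F else []) e) = pvBTail neg I F e := by
  rcases lt_trichotomy e 0 with he | he | he
  · -- e < 0
    set K := e.natAbs with hK
    set I' := List.replicate (K - I.length) '0' ++ I with hI'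
    have hKpos : 0 < K := by omega
    have hIdot' : '.' ∉ I' := by
      rw [hI']
      intro hm
      rcases List.mem_append.mp hm with h | h
      · simp at h
      · exact hI h
    have hKle : K ≤ I'.length := by rw [hI']; simp; omega
    have hA : pvAExp v (I ++ if hasDot then '.' :: F else []) e =
        I'.take (I'.length - K) ++ '.' :: (I'.drop (I'.length - K) ++ F) := by
      apply pv_exp_neg v _ I F e hI hF he
      cases hasDot with
      | true =>
        rw [if_pos rfl, if_neg (by simp [(hv he).mpr rfl])]
      | false =>
        rw [if_pos ?_, hnd rfl]
        · simp
        · intro hin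
          have := (hv he).mp hin
          simp at this
    rw [hA]
    have hfin := pv_fin' neg (I'.take (I'.length - K)) (I'.drop (I'.length - K) ++ F) true
      (fun hm => hIdot' (List.take_subset _ _ hm))
      (fun hm => (List.mem_append.mp hm).elim (fun h => hIdot' (List.drop_subset _ _ h)) hF)
      (by simp)
    rw [if_pos rfl] at hfin
    rw [hfin]
    rw [pv_bt_eq neg I F e (I' ++ F) (I'.length - K) ?hr]
    · rw [List.take_append_of_le_length (Nat.sub_le _ _), List.drop_append_of_le_length (Nat.sub_le _ _)]
    case hr =>
      by_cases hlt : I.length < K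
      · rw [if_pos (by omega)]
        have h1 : (-((I.length : Int) + e)).toNat = K - I.length := by omega
        have h2 : I'.length - K = 0 := by rw [hI']; simp; omega
        rw [h1, h2, hI']
        simp
      · rw [if_neg (by omega), if_neg (by simp; omega)]
        have h2 : I' = I := by rw [hI', Nat.sub_eq_zero_of_le (by omega)]; simp
        have h3 : ((I.length : Int) + e) = ((I.length - K : Nat) : Int) := by omega
        rw [h3, h2]
  · -- e = 0
    subst he
    rw [pv_exp_zero]
    rw [pv_fin' neg I F hasDot hI hF hnd]
    rw [pv_bt_eq neg I F 0 (I ++ F) I.length ?hr0]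
    · rw [List.take_left, List.drop_left]
    case hr0 =>
      rw [if_neg (by omega), if_neg (by simp)]
      simp
  · -- e > 0
    set K := e.toNat with hK
    have hKpos : 0 < K := by omega
    set F' := F ++ List.replicate (K - F.length) '0' with hF'
    have hFdot' : '.' ∉ F' := by
      rw [hF']
      intro hm
      rcases List.mem_append.mp hm with h | h
      · exact hF h
      · simp at h
    have hr : (if ((I.length : Int) + e) < 0 then (List.replicate (-((I.length : Int) + e)).toNat '0' ++ (I ++ F), (0 : Int))
           else if ((I.length : Int) + e) > (((I ++ F).length : Nat) : Int) then ((I ++ F) ++ List.replicate (((I.length : Int) + e) - (((I ++ F).length : Nat) : Int)).toNat '0', ((I.length : Int) + e))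
           else ((I ++ F), ((I.length : Int) + e)))
        = (I ++ F', ((I.length + K : Nat) : Int)) := by
      rw [if_neg (by omega)]
      by_cases hgt : (F.length : Int) < e
      · rw [if_pos (by simp; omega)]
        have h1 : (((I.length : Int) + e) - (((I ++ F).length : Nat) : Int)).toNat = K - F.length := by
          simp; omega
        have h2 : ((I.length : Int) + e) = ((I.length + K : Nat) : Int) := by omega
        rw [h1, h2, hF']
        simp
      · rw [if_neg (by simp; omega)]
        have h1 : F' = F := by rw [hF', Nat.sub_eq_zero_of_le (by omega)]; simp
        have h2 : ((I.length : Int) + e) = ((I.length + K : Nat) : Int) := by omega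
        rw [h1, h2]
    have hpre_eq : (I ++ F').take (I.length + K) = I ++ F'.take K := by
      rw [List.take_append]
      congr 1
      · exact List.take_of_length_le (by omega)
      · congr 1
        omega
    have hpost_eq : (I ++ F').drop (I.length + K) = F'.drop K := by
      rw [List.drop_append]
      rw [List.drop_of_length_le (by omega)]
      simp
    rw [pv_bt_eq neg I F e (I ++ F') (I.length + K) hr, hpre_eq, hpost_eq]
    cases hasDot with
    | true =>
      rw [if_pos rfl, pv_exp_pos v I F e hI hF he, ← hK, ← hF']
      by_cases hdp : F'.drop K = []
      · rw [if_neg (by simp [hdp])]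
        have := pv_fin' neg (I ++ F'.take K) [] false
          (fun hm => (List.mem_append.mp hm).elim hI (fun h => hFdot' (List.take_subset _ _ h)))
          (by simp) (fun _ => rfl)
        simp only [Bool.false_eq_true, if_false, List.append_nil] at this
        rw [hdp, List.append_nil, this]
      · rw [if_pos hdp]
        have := pv_fin' neg (I ++ F'.take K) (F'.drop K) true
          (fun hm => (List.mem_append.mp hm).elim hI (fun h => hFdot' (List.take_subset _ _ h)))
          (fun hm => hFdot' (List.drop_subset _ _ hm))
          (by simp)
        rw [if_pos rfl] at this
        rw [this]
    | false =>
      rw [if_neg (by simp), List.append_nil]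
      have hFnil : F = [] := hnd rfl
      simp only [pvAExp]
      rw [if_pos (show e > 0 from he)]
      rw [if_neg (by
        intro hin
        exact hI ((pv_isIn_singleton _ _).mp hin))]
      have hdig : F' = List.replicate K '0' := by
        rw [hF', hFnil]; simp
      have h1 : I ++ F'.take K = I ++ List.replicate K '0' := by
        rw [hdig, List.take_of_length_le (by simp)]
      have h2 : F'.drop K = [] := by
        rw [hdig, List.drop_of_length_le (by simp)]
      rw [h1, h2, ← hK]
      have := pv_fin' neg (I ++ List.replicate K '0') [] false
        (fun hm => (List.mem_append.mp hm).elim hI (fun h => by simp at h))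
        (by simp) (fun _ => rfl)
      simp only [Bool.false_eq_true, if_false, List.append_nil] at this
      rw [this]

theorem pv_takeWhile_eq_self_of_not_mem (c : Char) (l : List Char) (h : c ∉ l) :
    l.takeWhile (· ≠ c) = l := by
  rw [List.takeWhile_eq_self_iff]
  intro x hx
  simp
  rintro rfl
  exact h hx

theorem pv_dropWhile_eq_nil_of_not_mem (c : Char) (l : List Char) (h : c ∉ l) :
    l.dropWhile (· ≠ c) = [] := by
  rw [List.dropWhile_eq_nil_iff]
  intro x hx
  simp
  rintro rfl
  exact h hx

theorem pv_core_eq (v0 : List Char) (hpre :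
    (((if PySem.Chars.startswith v0 ['-'] then v0.tail else v0).takeWhile (· ≠ 'E')).count '.') ≤ 1 ∧
    ('E' ∈ (if PySem.Chars.startswith v0 ['-'] then v0.tail else v0) →
      (PySem.Int.ofChars?

        ((((if PySem.Chars.startswith v0 ['-'] then v0.tail else v0).dropWhile (· ≠ 'E')).tail).takeWhile (· ≠ 'E'))).isSome ∧
      ((PySem.Int.ofChars?
        ((((if PySem.Chars.startswith v0 ['-'] then v0.tail else v0).dropWhile (· ≠ 'E')).tail).takeWhile (· ≠ 'E'))).getD 0 < 0 →
        '.' ∉ (if PySem.Chars.startswith v0 ['-'] then v0.tail else v0).takeWhile (· ≠ 'E') →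
        '.' ∉ (if PySem.Chars.startswith v0 ['-'] then v0.tail else v0)))) :
    pvACore v0 = pvBCore v0 := by
  obtain ⟨hcount, hEpre⟩ := hpre
  -- the sign split is the same computation in both ports
  have hsl : PySem.List.slice v0 (some 1) none = v0.tail := by
    rw [PySem.List.slice_from _ (by norm_num)]
    simp [List.drop_one]
  rw [pvACore, pvBCore, hsl]
  set p := (if PySem.Chars.startswith v0 ['-'] then (['-'], v0.tail) else (([] : List Char), v0)) with hp
  set v := p.2 with hv2
  have hvv : v = (if PySem.Chars.startswith v0 ['-'] then v0.tail else v0) := by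
    rw [hv2, hp]
    by_cases hs : PySem.Chars.startswith v0 ['-'] <;> simp [hs]
  rw [← hvv] at hcount hEpre
  -- the exponent split agrees
  set m := v.takeWhile (· ≠ 'E') with hm
  set estr := ((v.dropWhile (· ≠ 'E')).tail).takeWhile (· ≠ 'E') with hestr
  set eV : Int := if 'E' ∈ v then (PySem.Int.ofChars? estr).getD 0 else 0 with heV
  have hq : (if PySem.Chars.isIn ['E'] v then
      (PySem.List.pyGetD (PySem.Chars.splitOn v ['E']) 0 [],
       (PySem.Int.ofChars? (PySem.List.pyGetD (PySem.Chars.splitOn v ['E']) 1 [])).getD 0)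
    else (v, 0)) = (m, eV) := by
    by_cases hE : 'E' ∈ v
    · rw [if_pos ((pv_isIn_singleton _ _).mpr hE)]
      rcases pv_splitOn_parts 'E' v hE with ⟨rest, hparts⟩
      rw [hparts, PySem.List.pyGetD_ofNat', PySem.List.pyGetD_ofNat']
      rw [heV, if_pos hE, hm, hestr]
      rfl
    · rw [if_neg (by simp [pv_isIn_singleton, hE])]
      rw [heV, if_neg hE, hm, pv_takeWhile_eq_self_of_not_mem 'E' v hE]
  rw [hq]
  have hpart1 : (pvBPartition v 'E').1 = m := rfl
  have hpart2 : (!(v.dropWhile (· ≠ 'E')).isEmpty) = true ↔ 'E' ∈ v := by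
    constructor
    · intro h
      by_contra hE
      rw [pv_dropWhile_eq_nil_of_not_mem 'E' v hE] at h
      simp at h
    · intro hE
      have hne := pv_dropWhile_ne_cons 'E' v hE
      cases hdw : v.dropWhile (· ≠ 'E') with
      | nil => rw [hdw] at hne; cases hne
      | cons a t => simp
  have hbe : (if (pvBPartition v 'E').2.1 then
      (PySem.Int.ofChars? (pvBPartition (pvBPartition v 'E').2.2 'E').1).getD 0 else 0) = eV := by
    by_cases hE : 'E' ∈ v
    · rw [if_pos (show (pvBPartition v 'E').2.1 = true from hpart2.mpr hE)]
      rw [heV, if_pos hE]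
      rfl
    · rw [if_neg (show ¬ (pvBPartition v 'E').2.1 = true from fun h => hE (hpart2.mp h))]
      rw [heV, if_neg hE]
  rw [hpart1, hbe]
  -- decompose the mantissa at its (unique) dot
  by_cases hdot : '.' ∈ m
  · set I := m.takeWhile (· ≠ '.') with hI
    set F := (m.dropWhile (· ≠ '.')).tail with hF
    have hmIF : m = I ++ '.' :: F := pv_split_decomp '.' m hdot
    have hIdot : '.' ∉ I := pv_not_mem_takeWhile_ne '.' m
    have hFdot : '.' ∉ F := by
      intro hFm
      have h1 : 1 ≤ F.count '.' := List.count_pos_iff.mpr hFm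
      have h2 : 2 ≤ m.count '.' := by
        rw [hmIF, List.count_append]
        have h3 : ('.' :: F).count '.' = F.count '.' + 1 := by simp
        omega
      omega
    have hvdot : eV < 0 → (PySem.Chars.isIn ['.'] v = true ↔ true = true) := by
      intro _
      simp only [iff_true]
      apply (pv_isIn_singleton _ _).mpr
      have : '.' ∈ m := hdot
      rw [hm] at this
      exact List.takeWhile_subset _ this
    have hA : pvAFinish p.1 (pvAExp v m eV) = pvBTail p.1 I F eV := by
      have : m = I ++ if true then '.' :: F else [] := by simpa using hmIF
      rw [this]
      exact pv_both p.1 v I F true eV hIdot hFdot (by simp) hvdot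
    rw [hA, pvBTail]
    rfl
  · have hI0 : (pvBPartition m '.').1 = m := pv_takeWhile_eq_self_of_not_mem '.' m hdot
    have hF0 : (pvBPartition m '.').2.2 = ([] : List Char) := by
      simp only [pvBPartition]
      rw [pv_dropWhile_eq_nil_of_not_mem '.' m hdot]
      rfl
    have hvdot : eV < 0 → (PySem.Chars.isIn ['.'] v = true ↔ false = true) := by
      intro hneg
      simp only [Bool.false_eq_true, iff_false]
      intro hin
      have hEmem : 'E' ∈ v := by
        by_contra hE
        rw [heV, if_neg hE] at hneg
        omega
      have hlt : (PySem.Int.ofChars? estr).getD 0 < 0 := by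
        rw [heV, if_pos hEmem] at hneg
        exact hneg
      exact (hEpre hEmem).2 hlt hdot ((pv_isIn_singleton _ _).mp hin)
    have hA : pvAFinish p.1 (pvAExp v m eV) = pvBTail p.1 m [] eV := by
      have : m = m ++ if false then '.' :: ([] : List Char) else [] := by simp
      conv_lhs => rw [this]
      exact pv_both p.1 v m [] false eV hdot (by simp) (fun _ => rfl) hvdot
    rw [hA, hI0, hF0, pvBTail]

-- ===== VERDICT (by name: the statement is the Claim_ definition above) =====
theorem remove_scientific_notation_py_spec : Claim_equal_remove_scientific_notation_py := by
  intro value _hdom hpre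
  unfold Spec_remove_scientific_notation_py remove_scientific_notation_py remove_scientific_notation_py_alt
  apply congrArg String.ofList
  apply pv_core_eq
  simp only [Pre_remove_scientific_notation_py] at hpre
  exact hpre
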